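-- pv_equiv track=rewrite | github.com/adam-ajroudi/King-Pawn-Wars | app.py | _king_in_pawn_check
-- ===== SOURCE A (Python) =====
-- def _king_in_pawn_check(board: dict, color: str) -> bool:
--     """
--     Return True when the king of *color* is on a square currently attacked
--     by an enemy pawn.  Used to distinguish checkmate from stalemate when a
--     player has zero legal moves.
--     """
--     king = next((sq for sq, v in board.items() if v == (color, "king")), None)
--     if not king:
--         return False
--     kc, kr = king
--     opp = "black" if color == "white" else "white"
--     for (pc, pr), (c, t) in board.items():
--         if c != opp or t != "pawn":
--             continue
--         if opp == "white" and pr + 1 == kr and abs(pc - kc) == 1: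
--             return True
--         if opp == "black" and pr - 1 == kr and abs(pc - kc) == 1:
--             return True
--     return False
-- ===== SOURCE B (Python) =====
-- def _king_in_pawn_check(board: dict, color: str) -> bool:
--     king = next((sq for sq, v in board.items() if v == (color, "king")), None)
--     if king is None:
--         return False
--     kc, kr = king
--     opp = "black" if color == "white" else "white"
--     pawn_rank = kr - 1 if opp == "white" else kr + 1
--     target = (opp, "pawn")
--     return board.get((kc - 1, pawn_rank)) == target or board.get((kc + 1, pawn_rank)) == target
-- ===== Notes on version B (the rewrite author's own statement) =====
-- stated objective: simpler
-- what changed: Instead of scanning every board entry and filtering for enemy pawns on an attacking square, B computes the only two squares an attacking enemy pawn could occupy and probes the dict at those two keys.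
import Mathlib
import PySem

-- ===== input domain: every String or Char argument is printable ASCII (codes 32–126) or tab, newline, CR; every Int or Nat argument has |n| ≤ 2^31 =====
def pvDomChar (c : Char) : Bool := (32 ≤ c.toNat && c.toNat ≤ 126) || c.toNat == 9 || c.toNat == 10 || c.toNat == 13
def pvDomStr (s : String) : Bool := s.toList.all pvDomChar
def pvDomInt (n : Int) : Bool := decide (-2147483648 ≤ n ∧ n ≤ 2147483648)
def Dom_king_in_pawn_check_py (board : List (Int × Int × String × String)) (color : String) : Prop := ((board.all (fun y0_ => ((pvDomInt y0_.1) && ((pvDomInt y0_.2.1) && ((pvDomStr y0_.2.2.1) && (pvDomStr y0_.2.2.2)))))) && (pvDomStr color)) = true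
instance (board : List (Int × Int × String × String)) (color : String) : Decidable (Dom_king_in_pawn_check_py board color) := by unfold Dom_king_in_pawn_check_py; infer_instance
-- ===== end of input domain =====

-- B replaces A's scan over every piece with two direct dict probes at the only
-- squares an attacking enemy pawn could occupy (objective: simpler/faster probe, same result).

-- ===== PORT A =====
-- shared by both ports: Python's identical line `next((sq for sq, v in board.items() if v == (color, "king")), None)`
def pvFindKing (board : List (Int × Int × String × String)) (color : String) : Option (Int × Int) :=
  board.findSome? (fun e => if (e.2.2.1, e.2.2.2) == (color, "king") then some (e.1, e.2.1) else none)

def king_in_pawn_check_py (board : List (Int × Int × String × String)) (color : String) : Bool :=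
  match pvFindKing board color with
  | none => false  -- `if not king: return False` (king is a tuple or None; non-empty tuples are truthy)
  | some (kc, kr) =>
    let opp := if color == "white" then "black" else "white"
    -- for-loop with `continue` and early `return True` = List.any of the combined condition
    board.any (fun e =>
      (e.2.2.1 == opp && e.2.2.2 == "pawn") &&
        ((opp == "white" && e.2.1 + 1 == kr && (e.1 - kc).natAbs == 1) ||
         (opp == "black" && e.2.1 - 1 == kr && (e.1 - kc).natAbs == 1)))

-- ===== PORT B =====
-- the dict argument, viewed as a PySem.Dict for `board.get(...)`
def pvBoardDict (board : List (Int × Int × String × String)) : PySem.Dict (Int × Int) (String × String) :=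
  PySem.Dict.mk (board.map (fun e => ((e.1, e.2.1), (e.2.2.1, e.2.2.2))))

def king_in_pawn_check_py_alt (board : List (Int × Int × String × String)) (color : String) : Bool :=
  match pvFindKing board color with
  | none => false
  | some (kc, kr) =>
    let opp := if color == "white" then "black" else "white"
    let pawnRank := if opp == "white" then kr - 1 else kr + 1
    let target : String × String := (opp, "pawn")
    let d := pvBoardDict board
    (d.get? (kc - 1, pawnRank) == some target) || (d.get? (kc + 1, pawnRank) == some target)

-- ===== PRECONDITION & SPEC =====
-- Pre_ excludes boards that list the same square twice: a Python dict cannot contain a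
-- duplicate key, so such lists are ambiguous under the assoc-list-as-dict encoding.
def Pre_king_in_pawn_check_py (board : List (Int × Int × String × String)) (_color : String) : Prop :=
  (board.map (fun e => (e.1, e.2.1))).Nodup

instance (board : List (Int × Int × String × String)) (color : String) : Decidable (Pre_king_in_pawn_check_py board color) := by unfold Pre_king_in_pawn_check_py; infer_instance

def pvWitness_king_in_pawn_check_py : (List (Int × Int × String × String)) × String :=
  ([(0, 0, "white", "king"), (1, 1, "black", "pawn")], "white")

def Spec_king_in_pawn_check_py (board : List (Int × Int × String × String)) (color : String) (out : Bool) : Prop := out = king_in_pawn_check_py_alt board color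
instance (board : List (Int × Int × String × String)) (color : String) (out : Bool) : Decidable (Spec_king_in_pawn_check_py board color out) := by unfold Spec_king_in_pawn_check_py; infer_instance

-- ===== CLAIM (what is proved, stated in full; the proofs are below) =====
def Claim_equal_king_in_pawn_check_py : Prop := ∀ (board : List (Int × Int × String × String)) (color : String), Dom_king_in_pawn_check_py board color → Pre_king_in_pawn_check_py board color → Spec_king_in_pawn_check_py board color (king_in_pawn_check_py board color)

-- ===== LEMMAS AND PROOFS =====

-- With distinct squares, scanning for an entry at one of two keys with a given value
-- is the same as probing the dict at those two keys.
lemma pv_any_eq_lookup2 (l : List (Int × Int × String × String))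
    (hnd : (l.map (fun e => (e.1, e.2.1))).Nodup)
    (p : Int × Int × String × String → Bool) (k1 k2 : Int × Int) (v : String × String)
    (hp : ∀ e ∈ l, p e = (((e.1, e.2.1) == k1 || (e.1, e.2.1) == k2) && ((e.2.2.1, e.2.2.2) == v))) :
    l.any p = (((pvBoardDict l).get? k1 == some v) || ((pvBoardDict l).get? k2 == some v)) := by
  have hkeys : (pvBoardDict l).keys.Nodup := by
    simpa [pvBoardDict, PySem.Dict.keys, Function.comp] using hnd
  rw [Bool.eq_iff_iff]
  rw [List.any_eq_true]
  constructor
  · rintro ⟨e, he, hpe⟩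
    rw [hp e he] at hpe
    simp only [Bool.and_eq_true, Bool.or_eq_true, beq_iff_eq] at hpe
    simp only [Bool.or_eq_true, beq_iff_eq]
    obtain ⟨hk | hk, hv⟩ := hpe
    · exact Or.inl ((PySem.Dict.get?_eq_some_iff_mem_items _ _ _ hkeys).2
        (List.mem_map.mpr ⟨e, he, by rw [hk, hv]⟩))
    · exact Or.inr ((PySem.Dict.get?_eq_some_iff_mem_items _ _ _ hkeys).2
        (List.mem_map.mpr ⟨e, he, by rw [hk, hv]⟩))
  · intro h
    simp only [Bool.or_eq_true, beq_iff_eq] at h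
    obtain h | h := h
    all_goals {
      rw [PySem.Dict.get?_eq_some_iff_mem_items _ _ _ hkeys] at h
      simp only [pvBoardDict, List.mem_map] at h
      obtain ⟨e, he, hev⟩ := h
      refine ⟨e, he, ?_⟩
      rw [hp e he]
      simp only [Prod.mk.injEq] at hev
      simp [hev.1, hev.2]
    }

theorem king_in_pawn_check_py_spec : Claim_equal_king_in_pawn_check_py := by
  intro board color _hdom hpre
  unfold Spec_king_in_pawn_check_py king_in_pawn_check_py king_in_pawn_check_py_alt
  cases hk : pvFindKing board color with
  | none => rfl
  | some king =>
    obtain ⟨kc, kr⟩ := king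
    by_cases hc : color = "white"
    · simp only [hc, beq_self_eq_true, if_pos]
      exact pv_any_eq_lookup2 board hpre _ (kc - 1, kr + 1) (kc + 1, kr + 1) ("black", "pawn")
        (fun e _ => by
          rw [Bool.eq_iff_iff]
          simp only [Bool.and_eq_true, Bool.or_eq_true, beq_iff_eq,
            Prod.mk.injEq]
          constructor
          · rintro ⟨⟨hc', ht⟩, ⟨⟨hw, hr⟩, ha⟩ | ⟨⟨hb, hr⟩, ha⟩⟩
            · exact absurd hw (by decide)
            · exact ⟨by omega, hc', ht⟩
          · rintro ⟨⟨h1a, h1b⟩ | ⟨h1a, h1b⟩, hc', ht⟩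
            · exact ⟨⟨hc', ht⟩, Or.inr ⟨⟨trivial, by omega⟩, by omega⟩⟩
            · exact ⟨⟨hc', ht⟩, Or.inr ⟨⟨trivial, by omega⟩, by omega⟩⟩)
    · simp only [show (color == "white") = false from by simpa using hc, Bool.false_eq_true,
        reduceIte]
      exact pv_any_eq_lookup2 board hpre _ (kc - 1, kr - 1) (kc + 1, kr - 1) ("white", "pawn")
        (fun e _ => by
          rw [Bool.eq_iff_iff]
          simp only [Bool.and_eq_true, Bool.or_eq_true, beq_iff_eq,
            Prod.mk.injEq]
          constructor
          · rintro ⟨⟨hc', ht⟩, ⟨⟨hw, hr⟩, ha⟩ | ⟨⟨hb, hr⟩, ha⟩⟩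
            · exact ⟨by omega, hc', ht⟩
            · exact absurd hb (by decide)
          · rintro ⟨⟨h1a, h1b⟩ | ⟨h1a, h1b⟩, hc', ht⟩
            · exact ⟨⟨hc', ht⟩, Or.inl ⟨⟨trivial, by omega⟩, by omega⟩⟩
            · exact ⟨⟨hc', ht⟩, Or.inl ⟨⟨trivial, by omega⟩, by omega⟩⟩)
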